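-- pv_equiv track=rewrite | github.com/shaharoded/KarmaLego | core/utils.py | check_symbols_lexicographically
-- ===== SOURCE A (Python) =====
-- def check_symbols_lexicographically(entity_symbols, pattern_symbols):
--     """
--     Find all index tuples in entity_symbols where pattern_symbols appear as a subsequence
--     in order (strictly increasing indices). Returns list of tuples of indices.
--     """
--     results = []
--
--     def helper(e_pos, p_pos, path):
--         if p_pos == len(pattern_symbols):
--             results.append(tuple(path))
--             return
--         symbol = pattern_symbols[p_pos]
--         for i in range(e_pos, len(entity_symbols)):
--             if entity_symbols[i] == symbol:
--                 helper(i + 1, p_pos + 1, path + [i])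
--
--     helper(0, 0, [])
--     return results if results else None
-- ===== SOURCE B (Python) =====
-- def check_symbols_lexicographically(entity_symbols, pattern_symbols):
--     """
--     Find all index tuples in entity_symbols where pattern_symbols appear as a subsequence
--     in order (strictly increasing indices). Returns list of tuples of indices.
--     """
--     n = len(entity_symbols)
--     paths = [[]]
--     for symbol in pattern_symbols:
--         nxt = []
--         for p in paths:
--             start = p[-1] + 1 if p else 0
--             for i in range(start, n):
--                 if entity_symbols[i] == symbol:
--                     nxt.append(p + [i])
--         paths = nxt
--     return [tuple(p) for p in paths] if paths else None
-- ===== Notes on version B (the rewrite author's own statement) =====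
-- stated objective: alternative
-- what changed: Replaces the recursive DFS backtracking (nested helper with a mutable results list) by an iterative level-by-level enumeration: a frontier of partial index paths is extended once per pattern symbol, each path resuming the scan after its last index.
import Mathlib
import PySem

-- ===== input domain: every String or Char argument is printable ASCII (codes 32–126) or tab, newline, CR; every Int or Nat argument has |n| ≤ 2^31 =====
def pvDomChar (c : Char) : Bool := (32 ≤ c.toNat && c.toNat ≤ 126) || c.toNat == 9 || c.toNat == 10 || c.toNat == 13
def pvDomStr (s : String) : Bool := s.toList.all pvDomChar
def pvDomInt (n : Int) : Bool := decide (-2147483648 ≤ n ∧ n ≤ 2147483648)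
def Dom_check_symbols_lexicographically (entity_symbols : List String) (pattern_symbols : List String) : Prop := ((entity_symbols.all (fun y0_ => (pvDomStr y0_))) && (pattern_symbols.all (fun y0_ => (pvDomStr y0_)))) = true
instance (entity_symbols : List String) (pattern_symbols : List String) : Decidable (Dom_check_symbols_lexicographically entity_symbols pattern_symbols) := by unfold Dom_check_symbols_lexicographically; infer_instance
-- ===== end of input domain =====

-- B replaces A's recursive DFS backtracking by an iterative level-by-level frontier
-- extension (one pass per pattern symbol); same results in the same order (alternative
-- decomposition, no speed claim).

-- ===== PORT A =====
-- the nested 'helper': recursion on p_pos, the inner 'for i in range(e_pos, len(entity_symbols))'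
-- as a foldl over the same range, results appended in call order
def helperA (es ps : List String) (e : Int) (p_pos : Nat) (path : List Int) : List (List Int) :=
  if p_pos = ps.length then [path]
  else
    if hlt : p_pos < ps.length then
      let symbol := ps[p_pos]
      (PySem.List.pyRange e (es.length : Int) 1).foldl
        (fun acc i =>
          if PySem.List.pyGet? es i = some symbol then
            acc ++ helperA es ps (i + 1) (p_pos + 1) (path ++ [i])
          else acc) []
    else []  -- unreachable: helper is only called with p_pos ≤ len(pattern_symbols)
termination_by ps.length - p_pos
decreasing_by omega

def check_symbols_lexicographically (entity_symbols : List String) (pattern_symbols : List String) : Option (List (List Int)) :=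
  let results := helperA entity_symbols pattern_symbols 0 0 []
  if results = [] then none else some results

-- ===== PORT B =====
-- start index of the scan that extends a partial path: p[-1] + 1 if p else 0
def startB (p : List Int) : Int :=
  match p.getLast? with
  | none => 0
  | some l => l + 1

-- inner 'for i in range(start, n): if match: nxt.append(p + [i])'
def extendB (es : List String) (symbol : String) (nxt : List (List Int)) (p : List Int) : List (List Int) :=
  (PySem.List.pyRange (startB p) (es.length : Int) 1).foldl
    (fun acc i => if PySem.List.pyGet? es i = some symbol then acc ++ [p ++ [i]] else acc) nxt

-- one frontier step: extend every current path by the next symbol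
def stepB (es : List String) (paths : List (List Int)) (symbol : String) : List (List Int) :=
  paths.foldl (extendB es symbol) []

def check_symbols_lexicographically_alt (entity_symbols : List String) (pattern_symbols : List String) : Option (List (List Int)) :=
  let paths := pattern_symbols.foldl (stepB entity_symbols) [[]]
  if paths = [] then none else some paths

-- ===== PRECONDITION & SPEC =====
def Spec_check_symbols_lexicographically (entity_symbols : List String) (pattern_symbols : List String) (out : Option (List (List Int))) : Prop := out = check_symbols_lexicographically_alt entity_symbols pattern_symbols
instance (entity_symbols : List String) (pattern_symbols : List String) (out : Option (List (List Int))) : Decidable (Spec_check_symbols_lexicographically entity_symbols pattern_symbols out) := by unfold Spec_check_symbols_lexicographically; infer_instance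

-- ===== CLAIM (what is proved, stated in full; the proofs are below) =====
def Claim_equal_check_symbols_lexicographically : Prop := ∀ (entity_symbols : List String) (pattern_symbols : List String), Dom_check_symbols_lexicographically entity_symbols pattern_symbols → Spec_check_symbols_lexicographically entity_symbols pattern_symbols (check_symbols_lexicographically entity_symbols pattern_symbols)

-- ===== LEMMAS AND PROOFS =====

-- generic: a foldl that conditionally extends the accumulator is acc ++ a flatMap
theorem foldl_ite_app {α β : Type} (l : List α) (P : α → Prop) [DecidablePred P]
    (g : α → List β) (acc : List β) :
    l.foldl (fun a x => if P x then a ++ g x else a) acc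
      = acc ++ l.flatMap (fun x => if P x then g x else []) := by
  induction l generalizing acc with
  | nil => simp
  | cons x xs ih =>
    simp only [List.foldl_cons, List.flatMap_cons, ih]
    split <;> simp

-- the match-and-extend step of B, as a flatMap body
def extAux (es : List String) (symbol : String) (p : List Int) : List (List Int) :=
  (PySem.List.pyRange (startB p) (es.length : Int) 1).flatMap
    (fun i => if PySem.List.pyGet? es i = some symbol then [p ++ [i]] else [])

theorem extendB_eq (es : List String) (symbol : String) (nxt : List (List Int)) (p : List Int) :
    extendB es symbol nxt p = nxt ++ extAux es symbol p := by
  unfold extendB extAux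
  exact foldl_ite_app _ _ _ nxt

theorem stepB_eq (es : List String) (paths : List (List Int)) (symbol : String) :
    stepB es paths symbol = paths.flatMap (extAux es symbol) := by
  unfold stepB
  have hf : extendB es symbol = fun acc p => acc ++ extAux es symbol p := by
    funext acc p; exact extendB_eq es symbol acc p
  rw [hf, PySem.List.foldl_append_eq_flatMap]
  simp

theorem startB_concat (p : List Int) (i : Int) : startB (p ++ [i]) = i + 1 := by
  simp [startB]

theorem helperA_base (es ps : List String) (e : Int) (path : List Int) :
    helperA es ps e ps.length path = [path] := by
  unfold helperA; simp

theorem helperA_step (es ps : List String) (p_pos : Nat) (hlt : p_pos < ps.length) (p : List Int) :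
    helperA es ps (startB p) p_pos p
      = (extAux es ps[p_pos] p).flatMap (fun q => helperA es ps (startB q) (p_pos + 1) q) := by
  conv_lhs => rw [helperA]
  rw [if_neg (by omega), dif_pos hlt]
  rw [foldl_ite_app _ (fun i => PySem.List.pyGet? es i = some ps[p_pos])
      (fun i => helperA es ps (i + 1) (p_pos + 1) (p ++ [i])) []]
  unfold extAux
  rw [List.flatMap_assoc]
  simp only [List.nil_append]
  congr 1
  funext i
  split
  · simp [startB_concat]
  · simp

theorem main_inv (es ps : List String) :
    ∀ (fuel p_pos : Nat) (L : List (List Int)), ps.length - p_pos = fuel → p_pos ≤ ps.length →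
      (ps.drop p_pos).foldl (stepB es) L
        = L.flatMap (fun p => helperA es ps (startB p) p_pos p) := by
  intro fuel
  induction fuel with
  | zero =>
    intro p_pos L hf h
    have hp : p_pos = ps.length := by omega
    subst hp
    simp [List.drop_length, helperA_base]
  | succ n ih =>
    intro p_pos L hf h
    have hlt : p_pos < ps.length := by omega
    rw [List.drop_eq_getElem_cons hlt, List.foldl_cons, stepB_eq,
        ih (p_pos + 1) _ (by omega) (by omega), List.flatMap_assoc]
    congr 1
    funext p
    exact (helperA_step es ps p_pos hlt p).symm

-- ===== VERDICT (by name: the statement is the Claim_ definition above) =====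
theorem check_symbols_lexicographically_spec : Claim_equal_check_symbols_lexicographically := by
  intro es ps _
  unfold Spec_check_symbols_lexicographically
  unfold check_symbols_lexicographically check_symbols_lexicographically_alt
  have h := main_inv es ps ps.length 0 [[]] (by omega) (by omega)
  simp only [List.drop_zero, List.flatMap_cons, List.flatMap_nil, List.append_nil] at h
  rw [h]
  rfl
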